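-- pv_equiv track=rewrite | github.com/every-algorithm/python | search/two-way_string-matching_algorithm.py | compute_max_suffix
-- ===== SOURCE A (Python) =====
-- def compute_max_suffix(pattern):
--     """Compute maximum suffix of pattern."""
--     n = len(pattern)
--     max_suf = 0
--     for i in range(n - 1):
--         if pattern[i] <= pattern[i + 1]:
--             if i + 1 > max_suf:
--                 max_suf = i + 1
--     return max_suf
-- ===== SOURCE B (Python) =====
-- def compute_max_suffix(pattern):
--     """Compute maximum suffix of pattern."""
--     n = len(pattern)
--     for i in range(n - 2, -1, -1):
--         if pattern[i] <= pattern[i + 1]: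
--             return i + 1
--     return 0
-- ===== Notes on version B (the rewrite author's own statement) =====
-- stated objective: faster
-- what changed: Replaces A's forward full scan with a running-max accumulator by a reverse traversal that returns immediately at the first (i.e. last-in-order) ascending adjacent pair.
import Mathlib
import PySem

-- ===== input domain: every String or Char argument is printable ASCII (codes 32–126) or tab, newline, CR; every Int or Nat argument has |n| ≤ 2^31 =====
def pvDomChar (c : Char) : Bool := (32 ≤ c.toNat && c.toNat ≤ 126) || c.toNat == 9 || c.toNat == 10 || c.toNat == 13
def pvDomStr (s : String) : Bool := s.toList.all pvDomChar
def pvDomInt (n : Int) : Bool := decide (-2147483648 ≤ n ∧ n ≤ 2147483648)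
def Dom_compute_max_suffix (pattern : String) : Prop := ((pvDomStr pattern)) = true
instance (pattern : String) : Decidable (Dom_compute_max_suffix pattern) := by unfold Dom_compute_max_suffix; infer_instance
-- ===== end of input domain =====

-- B replaces A's forward scan with running-max accumulator by a reverse traversal
-- returning at the first ascending adjacent pair found from the right (alternative decomposition).


-- ===== PORT A =====
-- forward loop over range(n-1), keeping the running maximum max_suf (indices are always in range, so getD is exact)
def compute_max_suffix (pattern : String) : Int :=
  let l := pattern.toList
  let n := l.length
  (List.range (n - 1)).foldl
    (fun max_suf i =>
      if l.getD i ' ' ≤ l.getD (i + 1) ' ' then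
        if (i : Int) + 1 > max_suf then (i : Int) + 1 else max_suf
      else max_suf) 0

-- ===== PORT B =====
-- reverse loop: i runs from n-2 down to 0; return i+1 at the first ascending pair; 0 if none
def csmAltGo (l : List Char) : Nat → Int
  | 0 => 0
  | i + 1 => if l.getD i ' ' ≤ l.getD (i + 1) ' ' then (i : Int) + 1 else csmAltGo l i

def compute_max_suffix_alt (pattern : String) : Int :=
  csmAltGo pattern.toList (pattern.toList.length - 1)

-- ===== PRECONDITION & SPEC =====
def Spec_compute_max_suffix (pattern : String) (out : Int) : Prop := out = compute_max_suffix_alt pattern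
instance (pattern : String) (out : Int) : Decidable (Spec_compute_max_suffix pattern out) := by unfold Spec_compute_max_suffix; infer_instance

-- ===== CLAIM (what is proved, stated in full; the proofs are below) =====
def Claim_equal_compute_max_suffix : Prop := ∀ (pattern : String), Dom_compute_max_suffix pattern → Spec_compute_max_suffix pattern (compute_max_suffix pattern)

-- ===== LEMMAS AND PROOFS =====

lemma csmAltGo_le (l : List Char) (k : Nat) : csmAltGo l k ≤ (k : Int) := by
  induction k with
  | zero => simp [csmAltGo]
  | succ i ih =>
    simp only [csmAltGo]
    split
    · simp
    · exact le_trans ih (by push_cast; omega)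

lemma csmFold_eq (l : List Char) (k : Nat) :
    (List.range k).foldl
      (fun max_suf i =>
        if l.getD i ' ' ≤ l.getD (i + 1) ' ' then
          if (i : Int) + 1 > max_suf then (i : Int) + 1 else max_suf
        else max_suf) 0 = csmAltGo l k := by
  induction k with
  | zero => simp [csmAltGo]
  | succ i ih =>
    rw [List.range_succ, List.foldl_append, ih]
    simp only [List.foldl_cons, List.foldl_nil, csmAltGo]
    split
    · have := csmAltGo_le l i
      rw [if_pos (by omega)]
    · rfl

-- ===== VERDICT (by name: the statement is the Claim_ definition above) =====
theorem compute_max_suffix_spec : Claim_equal_compute_max_suffix := by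
  intro pattern _
  unfold Spec_compute_max_suffix compute_max_suffix compute_max_suffix_alt
  exact csmFold_eq _ _
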